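-- pv_equiv track=rewrite | github.com/leerillet/ECFD | ECFD-cascade-forest/parallel_kfold.py | allocate_tasks
-- ===== SOURCE A (Python) =====
-- def allocate_tasks(allfold,n_jobs):
--     task_num=allfold//n_jobs  #共n_jobs个task
--     fold_left=allfold%n_jobs  #剩余fold数
--     job_lens=[task_num for i in range(n_jobs)]  #每个job里有task_num个fold
--     for i in range(fold_left):
--         job_lens[i]+=1
--     allocations=[]
--     begin=0
--     for i in range(len(job_lens)):
--         allocations.append((begin,begin+job_lens[i]))
--         begin=begin+job_lens[i]
--     return allocations
-- ===== SOURCE B (Python) =====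
-- def allocate_tasks(allfold, n_jobs):
--     q, r = divmod(allfold, n_jobs)
--     start = lambda i: i * q + min(i, r)
--     return [(start(i), start(i + 1)) for i in range(n_jobs)]
-- ===== Notes on version B (the rewrite author's own statement) =====
-- stated objective: idiomatic
-- what changed: Replaced the mutated job_lens array and the sequential 'begin' accumulator with a single comprehension computing each job's (start, end) in closed form: start(i) = i*q + min(i, r).
import Mathlib
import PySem

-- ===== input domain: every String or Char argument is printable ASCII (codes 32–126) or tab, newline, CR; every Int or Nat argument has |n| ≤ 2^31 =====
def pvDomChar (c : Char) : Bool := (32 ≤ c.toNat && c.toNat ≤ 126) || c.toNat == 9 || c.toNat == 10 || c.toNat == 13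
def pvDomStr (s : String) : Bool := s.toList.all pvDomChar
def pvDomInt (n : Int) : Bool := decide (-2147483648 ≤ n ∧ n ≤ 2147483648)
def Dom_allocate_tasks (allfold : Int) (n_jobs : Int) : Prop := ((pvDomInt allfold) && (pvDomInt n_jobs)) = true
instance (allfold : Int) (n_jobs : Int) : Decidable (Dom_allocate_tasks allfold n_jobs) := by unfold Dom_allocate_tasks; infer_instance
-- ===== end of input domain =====

-- B replaces A's mutated job_lens array and running 'begin' accumulator with one
-- comprehension computing each job's (start, end) in closed form (objective: idiomatic).

-- ===== PORT A =====
def allocate_tasks (allfold : Int) (n_jobs : Int) : List (Int × Int) :=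
  let task_num := PySem.Int.floordiv allfold n_jobs
  let fold_left := PySem.Int.mod allfold n_jobs
  let job_lens := (PySem.List.pyRange 0 n_jobs 1).map (fun _ => task_num)
  let job_lens := (PySem.List.pyRange 0 fold_left 1).foldl
      (fun js i => PySem.List.pySetD js i (PySem.List.pyGetD js i 0 + 1)) job_lens
  ((PySem.List.pyRange 0 (job_lens.length : Int) 1).foldl
      (fun (acc : List (Int × Int) × Int) i =>
        let l := PySem.List.pyGetD job_lens i 0
        (acc.1 ++ [(acc.2, acc.2 + l)], acc.2 + l)) ([], 0)).1

-- ===== PORT B =====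
def allocate_tasks_alt (allfold : Int) (n_jobs : Int) : List (Int × Int) :=
  let q := PySem.Int.floordiv allfold n_jobs
  let r := PySem.Int.mod allfold n_jobs
  (PySem.List.pyRange 0 n_jobs 1).map (fun i => (i * q + min i r, (i + 1) * q + min (i + 1) r))

-- ===== PRECONDITION & SPEC =====
-- Pre_ excludes only n_jobs = 0, where Python A raises ZeroDivisionError.
def Pre_allocate_tasks (allfold : Int) (n_jobs : Int) : Prop := n_jobs ≠ 0
instance (allfold : Int) (n_jobs : Int) : Decidable (Pre_allocate_tasks allfold n_jobs) := by unfold Pre_allocate_tasks; infer_instance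
def pvWitness_allocate_tasks : Int × Int := (10, 3)

def Spec_allocate_tasks (allfold : Int) (n_jobs : Int) (out : List (Int × Int)) : Prop := out = allocate_tasks_alt allfold n_jobs
instance (allfold : Int) (n_jobs : Int) (out : List (Int × Int)) : Decidable (Spec_allocate_tasks allfold n_jobs out) := by unfold Spec_allocate_tasks; infer_instance

-- ===== CLAIM (what is proved, stated in full; the proofs are below) =====
def Claim_equal_allocate_tasks : Prop := ∀ (allfold : Int) (n_jobs : Int), Dom_allocate_tasks allfold n_jobs → Pre_allocate_tasks allfold n_jobs → Spec_allocate_tasks allfold n_jobs (allocate_tasks allfold n_jobs)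

-- ===== LEMMAS AND PROOFS =====

-- prefix-pair scan used to characterise A's accumulator loop
def scanPairs (b : Int) : List Int → List (Int × Int)
  | [] => []
  | l :: t => (b, b + l) :: scanPairs (b + l) t

theorem foldl_scanPairs (L : List Int) (acc : List (Int × Int)) (b : Int) :
    (L.foldl (fun (acc : List (Int × Int) × Int) l => (acc.1 ++ [(acc.2, acc.2 + l)], acc.2 + l)) (acc, b)).1
      = acc ++ scanPairs b L := by
  induction L generalizing acc b with
  | nil => simp [scanPairs]
  | cons l t ih => simp [scanPairs, ih]

-- the increment loop turns the constant list into "q+1 for the first r slots, q after"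
theorem incr_fold (q n r m : Int) (hm : 0 ≤ m) (hmr : m ≤ r) (hrn : r ≤ n) :
    (PySem.List.pyRange m r 1).foldl
        (fun js i => PySem.List.pySetD js i (PySem.List.pyGetD js i 0 + 1))
        ((PySem.List.pyRange 0 n 1).map (fun i => if i < m then q + 1 else q))
      = (PySem.List.pyRange 0 n 1).map (fun i => if i < r then q + 1 else q) := by
  have hk : (r - m).toNat = (r - m).toNat := rfl
  generalize hgen : (r - m).toNat = k at hk
  clear hk
  induction k generalizing m with
  | zero =>
      have hmr' : r = m := by omega
      subst hmr'
      rw [PySem.List.pyRange_one_eq_nil le_rfl]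
      simp
  | succ k ih =>
      have hlt : m < r := by omega
      rw [PySem.List.pyRange_one_cons hlt]
      simp only [List.foldl_cons]
      rw [PySem.List.pyGetD_map_pyRange_of_nonneg _ n m 0 hm (by omega), if_neg (lt_irrefl m)]
      have hset : PySem.List.pySetD ((PySem.List.pyRange 0 n 1).map (fun i => if i < m then q + 1 else q)) m (q + 1)
          = (PySem.List.pyRange 0 n 1).map (fun i => if i < m + 1 then q + 1 else q) := by
        rw [PySem.List.pySetD_of_nonneg _ _ hm]
        apply List.ext_getElem
        · simp
        · intro j h1 h2
          have hj : j < (n - 0).toNat := by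
            simpa [PySem.List.length_pyRange_one] using h2
          simp only [List.getElem_set, List.getElem_map, PySem.List.getElem_pyRange_one, zero_add]
          by_cases hje : m.toNat = j
          · rw [if_pos hje, if_pos (by omega : (j : Int) < m + 1)]
          · rw [if_neg hje]
            by_cases hjm : (j : Int) < m
            · rw [if_pos hjm, if_pos (by omega : (j : Int) < m + 1)]
            · rw [if_neg hjm, if_neg (by omega : ¬ (j : Int) < m + 1)]
      rw [hset]
      exact ih (m + 1) (by omega) (by omega) (by omega)

-- the closed form start(i) = i*q + min i r walks the scan
theorem scan_closed (q r n a : Int) (hr : 0 ≤ r) :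
    scanPairs (a * q + min a r) ((PySem.List.pyRange a n 1).map (fun i => if i < r then q + 1 else q))
      = (PySem.List.pyRange a n 1).map
          (fun i => (i * q + min i r, (i + 1) * q + min (i + 1) r)) := by
  have hk : (n - a).toNat = (n - a).toNat := rfl
  generalize hgen : (n - a).toNat = k at hk
  clear hk
  induction k generalizing a with
  | zero =>
      rw [PySem.List.pyRange_one_eq_nil (by omega)]
      simp [scanPairs]
  | succ k ih =>
      have hlt : a < n := by omega
      rw [PySem.List.pyRange_one_cons hlt]
      simp only [List.map_cons, scanPairs, List.cons.injEq]
      have hstep : a * q + min a r + (if a < r then q + 1 else q)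
          = (a + 1) * q + min (a + 1) r := by
        by_cases har : a < r
        · rw [if_pos har, min_eq_left (by omega), min_eq_left (by omega)]; ring
        · rw [if_neg har, min_eq_right (by omega), min_eq_right (by omega)]; ring
      rw [hstep]
      exact ⟨rfl, ih (a + 1) (by omega)⟩

theorem allocate_tasks_spec : Claim_equal_allocate_tasks := by
  intro allfold n_jobs _ hpre
  unfold Spec_allocate_tasks allocate_tasks allocate_tasks_alt
  simp only []
  set q := PySem.Int.floordiv allfold n_jobs with hq
  set r := PySem.Int.mod allfold n_jobs with hr
  by_cases hpos : 0 < n_jobs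
  · -- n_jobs > 0 : r ∈ [0, n_jobs)
    have hr0 : 0 ≤ r := by
      rw [hr, PySem.Int.mod_eq_emod_of_pos hpos]
      exact Int.emod_nonneg _ (by omega)
    have hrn : r < n_jobs := by
      rw [hr, PySem.Int.mod_eq_emod_of_pos hpos]
      exact Int.emod_lt_of_pos _ hpos
    have hconst : (PySem.List.pyRange 0 n_jobs 1).map (fun _ => q)
        = (PySem.List.pyRange 0 n_jobs 1).map (fun i => if i < (0 : Int) then q + 1 else q) := by
      apply List.map_congr_left
      intro i hi
      have := (PySem.List.mem_pyRange_one).1 hi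
      rw [if_neg (by omega)]
    rw [hconst, incr_fold q n_jobs r 0 le_rfl hr0 (le_of_lt hrn)]
    rw [PySem.List.foldl_pyRange_zero_pyGetD' _ 0
      (fun (acc : List (Int × Int) × Int) l => (acc.1 ++ [(acc.2, acc.2 + l)], acc.2 + l)) ([], 0)]
    rw [foldl_scanPairs]
    have h0 : (0 : Int) = 0 * q + min 0 r := by
      rw [min_eq_left hr0]; ring
    have hs := scan_closed q r n_jobs 0 hr0
    rw [← h0] at hs
    rw [List.nil_append, hs]
  · -- n_jobs < 0 : both sides are []
    have hneg : n_jobs < 0 := by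
      have hne : n_jobs ≠ 0 := hpre
      omega
    rw [PySem.List.pyRange_one_eq_nil (by omega : n_jobs ≤ 0)]
    simp only [List.map_nil]
    have hfold : ∀ (L : List Int),
        L.foldl (fun js i => PySem.List.pySetD js i (PySem.List.pyGetD js i 0 + 1)) ([] : List Int) = [] := by
      intro L
      induction L with
      | nil => rfl
      | cons x t ih =>
          simp only [List.foldl_cons]
          have : PySem.List.pySetD ([] : List Int) x (PySem.List.pyGetD ([] : List Int) x 0 + 1) = [] := by
            unfold PySem.List.pySetD PySem.List.pySet?
            cases PySem.List.pyIdx? (List.length ([] : List Int)) x <;> simp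
          rw [this, ih]
      
    rw [hfold]
    simp only [List.length_nil, Nat.cast_zero]
    rw [PySem.List.pyRange_one_eq_nil le_rfl]
    rfl
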